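-- pv_equiv track=rewrite | github.com/spencer-zepelin/AoC | 2020/errata/24/pt1.py | parseDir
-- ===== SOURCE A (Python) =====
-- def parseDir(rawDir):
--     length = len(rawDir)
--     ctr = 0
--     out = []
--     curr = ""
--     while ctr < length:
--         if rawDir[ctr] in ["e", "w"]:
--             curr += rawDir[ctr]
--             out.append(curr)
--             curr = ""
--         else:
--             curr += rawDir[ctr]
--         ctr += 1
--     return out
-- ===== SOURCE B (Python) =====
-- def parseDir(rawDir):
--     ends = [i for i, c in enumerate(rawDir) if c in "ew"]
--     return [rawDir[s + 1:e + 1] for s, e in zip([-1] + ends, ends)]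
-- ===== Notes on version B (the rewrite author's own statement) =====
-- stated objective: idiomatic
-- what changed: B replaces A's character-by-character while-loop with a mutable accumulator string by two comprehensions: it computes the list of terminator ('e'/'w') indices once with enumerate, then slices the input between consecutive terminators via zip.
import Mathlib
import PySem

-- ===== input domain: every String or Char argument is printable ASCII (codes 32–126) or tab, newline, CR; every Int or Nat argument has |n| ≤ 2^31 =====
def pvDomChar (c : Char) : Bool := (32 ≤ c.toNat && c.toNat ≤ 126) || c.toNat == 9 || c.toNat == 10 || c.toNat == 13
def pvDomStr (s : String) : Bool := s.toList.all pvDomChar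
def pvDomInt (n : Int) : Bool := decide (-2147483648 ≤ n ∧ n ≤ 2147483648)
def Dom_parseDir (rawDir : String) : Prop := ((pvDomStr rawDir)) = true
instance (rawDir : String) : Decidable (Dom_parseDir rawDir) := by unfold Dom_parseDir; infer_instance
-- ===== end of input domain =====

-- B tokenizes by slicing between precomputed 'e'/'w' terminator indices instead of A's
-- char-by-char accumulator loop; same O(n) cost, different (more idiomatic) decomposition.

-- shared char test: Python's  c in ["e","w"]  /  c in "ew"
def pvEW (c : Char) : Bool := c == 'e' || c == 'w'

-- ===== PORT A =====
-- A's while-loop over ctr reading rawDir[ctr], state (out, curr); curr kept as List Char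
-- (Python string concatenation curr += ch), appended to out as a String.
def parseDirLoop : List Char → List String → List Char → List String
  | [], out, _ => out
  | c :: rest, out, curr =>
    if pvEW c then parseDirLoop rest (out ++ [String.ofList (curr ++ [c])]) []
    else parseDirLoop rest out (curr ++ [c])

def parseDir (rawDir : String) : List String :=
  parseDirLoop rawDir.toList [] []

-- ===== PORT B =====
-- ends = [i for i, c in enumerate(rawDir) if c in "ew"]; tokens = slices between consecutive ends.
def parseDir_alt (rawDir : String) : List String :=
  let cs := rawDir.toList
  let ends : List Int := ((PySem.List.enumerate cs).filter (fun p => pvEW p.2)).map (·.1)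
  (List.zip ((-1 : Int) :: ends) ends).map
    (fun p => String.ofList (PySem.List.slice cs (some (p.1 + 1)) (some (p.2 + 1))))

-- ===== PRECONDITION & SPEC =====
def Spec_parseDir (rawDir : String) (out : List String) : Prop := out = parseDir_alt rawDir
instance (rawDir : String) (out : List String) : Decidable (Spec_parseDir rawDir out) := by unfold Spec_parseDir; infer_instance

-- ===== CLAIM (what is proved, stated in full; the proofs are below) =====
def Claim_equal_parseDir : Prop := ∀ (rawDir : String), Dom_parseDir rawDir → Spec_parseDir rawDir (parseDir rawDir)

-- ===== LEMMAS AND PROOFS =====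

-- canonical tokenizer (proof-only): T cs = the token char-lists both programs produce
def pvPF (acc : List Char) : List (List Char) → List (List Char)
  | [] => []
  | t :: ts => (acc ++ t) :: ts

def pvT : List Char → List (List Char)
  | [] => []
  | c :: cs => if pvEW c then [c] :: pvT cs else pvPF [c] (pvT cs)

-- terminator indices, structurally (proof-only)
def pvE : List Char → Int → List Int
  | [], _ => []
  | c :: cs, s => if pvEW c then s :: pvE cs (s + 1) else pvE cs (s + 1)

theorem pvPF_nil (ts : List (List Char)) : pvPF [] ts = ts := by
  cases ts <;> simp [pvPF]

theorem pvPF_cons (a t : List Char) (ts : List (List Char)) :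
    pvPF a (t :: ts) = (a ++ t) :: ts := rfl

theorem pvPF_pvPF (a b : List Char) (ts : List (List Char)) :
    pvPF a (pvPF b ts) = pvPF (a ++ b) ts := by
  cases ts <;> simp [pvPF]

-- A's loop in terms of pvT
theorem parseDirLoop_eq (cs : List Char) :
    ∀ (out : List String) (acc : List Char),
      parseDirLoop cs out acc = out ++ (pvPF acc (pvT cs)).map String.ofList := by
  induction cs with
  | nil => intro out acc; simp [parseDirLoop, pvT, pvPF]
  | cons c cs ih =>
    intro out acc
    by_cases h : pvEW c = true
    · simp [parseDirLoop, pvT, h, ih, pvPF_nil, pvPF_cons]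
    · simp [parseDirLoop, pvT, h, ih, pvPF_pvPF]

-- B's ends expression equals pvE
theorem ends_eq_pvE (cs : List Char) :
    ∀ s : Int, ((PySem.List.enumerate cs s).filter (fun p => pvEW p.2)).map (·.1) = pvE cs s := by
  induction cs with
  | nil => intro s; simp [PySem.List.enumerate_nil, pvE]
  | cons c cs ih =>
    intro s
    rw [PySem.List.enumerate_cons]
    by_cases h : pvEW c = true <;> simp [pvE, h, ih]

theorem pvE_shift (cs : List Char) : ∀ s : Int, pvE cs (s + 1) = (pvE cs s).map (· + 1) := by
  induction cs with
  | nil => intro s; simp [pvE]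
  | cons c cs ih =>
    intro s
    by_cases h : pvEW c = true <;> simp [pvE, h, ih]

theorem pvE_lb (cs : List Char) : ∀ (s x : Int), x ∈ pvE cs s → s ≤ x := by
  induction cs with
  | nil => intro s x hx; simp [pvE] at hx
  | cons c cs ih =>
    intro s x hx
    by_cases h : pvEW c = true
    · simp [pvE, h] at hx
      rcases hx with rfl | hx
      · exact le_refl _
      · have := ih (s + 1) x hx; omega
    · simp [pvE, h] at hx
      have := ih (s + 1) x hx; omega

-- the token-building map of B (proof-only shorthand)
def pvZ (cs : List Char) (l : List Int) : List (List Char) :=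
  (List.zip ((-1 : Int) :: l) l).map
    (fun p => PySem.List.slice cs (some (p.1 + 1)) (some (p.2 + 1)))

-- slicing shifted by one past a cons
theorem slice_cons_shift (c : Char) (cs : List Char) (a b : Int) (ha : 0 ≤ a) (hb : 0 ≤ b) :
    PySem.List.slice (c :: cs) (some (a + 1)) (some (b + 1))
      = PySem.List.slice cs (some a) (some b) := by
  rw [PySem.List.slice_toNat _ (by omega) (by omega), PySem.List.slice_toNat _ ha hb]
  have h1 : (a + 1).toNat = a.toNat + 1 := by omega
  rw [h1, List.drop_succ_cons]
  congr 1
  omega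

theorem slice_cons_zero (c : Char) (cs : List Char) (b : Int) (hb : 0 ≤ b) :
    PySem.List.slice (c :: cs) none (some (b + 1 + 1))
      = c :: PySem.List.slice cs none (some (b + 1)) := by
  rw [PySem.List.slice_to _ (by omega), PySem.List.slice_to _ (by omega)]
  have h1 : (b + 1 + 1).toNat = (b + 1).toNat + 1 := by omega
  rw [h1, List.take_succ_cons]

theorem pvZ_cons_ew (c : Char) (cs : List Char) (l : List Int) (h : ∀ x ∈ l, (0:Int) ≤ x) :
    pvZ (c :: cs) (0 :: l.map (· + 1)) = [c] :: pvZ cs l := by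
  simp only [pvZ, List.zip_cons_cons, List.map_cons]
  congr 1
  rw [show ((0 : Int) :: l.map (· + 1)) = ((-1 : Int) :: l).map (· + 1) from by simp,
      List.zip_map, List.map_map]
  apply List.map_congr_left
  intro p hp
  have h1 := (List.of_mem_zip hp).1
  have h2 := (List.of_mem_zip hp).2
  have hp1 : (-1 : Int) ≤ p.1 := by
    rcases List.mem_cons.mp h1 with h' | h'
    · omega
    · have := h _ h'; omega
  have hp2 : (0 : Int) ≤ p.2 := h _ h2
  simp only [Function.comp, Prod.map]
  exact slice_cons_shift c cs (p.1 + 1) (p.2 + 1) (by omega) (by omega)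

theorem pvZ_cons_ne (c : Char) (cs : List Char) (l : List Int) (h : ∀ x ∈ l, (0:Int) ≤ x) :
    pvZ (c :: cs) (l.map (· + 1)) = pvPF [c] (pvZ cs l) := by
  cases l with
  | nil => simp [pvZ, pvPF]
  | cons e0 l2 =>
    have he0 : (0 : Int) ≤ e0 := h _ (List.mem_cons_self)
    simp only [List.map_cons, pvZ, List.zip_cons_cons, List.map_cons, pvPF]
    congr 1
    · norm_num
      rw [slice_cons_zero c cs e0 he0]
    · rw [show ((e0 + 1) :: l2.map (· + 1)) = ((e0 :: l2).map (· + 1)) from by simp,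
          List.zip_map, List.map_map]
      apply List.map_congr_left
      intro p hp
      have h1 := (List.of_mem_zip hp).1
      have h2 := (List.of_mem_zip hp).2
      have hp1 : (0 : Int) ≤ p.1 := h _ h1
      have hp2 : (0 : Int) ≤ p.2 := h _ (List.mem_cons_of_mem _ h2)
      simp only [Function.comp, Prod.map]
      exact slice_cons_shift c cs (p.1 + 1) (p.2 + 1) (by omega) (by omega)

theorem pvZ_eq_pvT (cs : List Char) : pvZ cs (pvE cs 0) = pvT cs := by
  induction cs with
  | nil => simp [pvZ, pvE, pvT]
  | cons c cs ih =>
    have hsh := pvE_shift cs 0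
    norm_num at hsh
    have hlb : ∀ x ∈ pvE cs 0, (0:Int) ≤ x := fun x hx => pvE_lb cs 0 x hx
    by_cases h : pvEW c = true
    · have he : pvE (c :: cs) 0 = 0 :: (pvE cs 0).map (· + 1) := by simp [pvE, h, hsh]
      rw [he, pvZ_cons_ew c cs _ hlb, ih]
      simp [pvT, h]
    · have he : pvE (c :: cs) 0 = (pvE cs 0).map (· + 1) := by simp [pvE, h, hsh]
      rw [he, pvZ_cons_ne c cs _ hlb, ih]
      simp [pvT, h]

theorem parseDir_eq (s : String) : parseDir s = parseDir_alt s := by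
  unfold parseDir parseDir_alt
  simp only []
  rw [parseDirLoop_eq, ends_eq_pvE, pvPF_nil, List.nil_append]
  have hmap : (List.zip ((-1 : Int) :: pvE s.toList 0) (pvE s.toList 0)).map
      (fun p => String.ofList (PySem.List.slice s.toList (some (p.1 + 1)) (some (p.2 + 1))))
      = (pvZ s.toList (pvE s.toList 0)).map String.ofList := by
    simp [pvZ, List.map_map, Function.comp]
  rw [hmap, pvZ_eq_pvT]

-- ===== VERDICT (by name: the statement is the Claim_ definition above) =====
theorem parseDir_spec : Claim_equal_parseDir := by
  intro rawDir _
  unfold Spec_parseDir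
  exact parseDir_eq rawDir
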